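-- pv_equiv track=rewrite | github.com/MrBrantCode/unitest_baseline | mut_generate/mist_train_taco/taco_3651/solution.py | calculate_minimum_distances_sum
-- ===== SOURCE A (Python) =====
-- def calculate_minimum_distances_sum(n, m, roads):
--     p = list(range(n))
--
--     def dsu_get(v):
--         if p[v] != v:
--             p[v] = dsu_get(p[v])
--         return p[v]
--
--     def dsu_merge(u, v):
--         u = dsu_get(u)
--         v = dsu_get(v)
--         p[u] = v
--         return u != v
--
--     e = []
--     for (a, b, c) in roads:
--         e.append((c, a - 1, b - 1))
--     e.sort()
--
--     G = [[] for _ in range(n)]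
--     for (c, a, b) in e:
--         if dsu_merge(a, b):
--             G[a].append((b, c))
--             G[b].append((a, c))
--
--     f = [0] * m
--
--     def dfs(v, par=-1):
--         sz = 1
--         for (u, c) in G[v]:
--             if u == par:
--                 continue
--             y = dfs(u, v)
--             f[c] = y * (n - y)
--             sz += y
--         return sz
--
--     dfs(0)
--     ans = 0
--     for x in f[::-1]:
--         ans *= 2
--         ans += x
--     return bin(ans)[2:]
-- ===== SOURCE B (Python) =====
-- def calculate_minimum_distances_sum(n, m, roads):
--     parent = list(range(n))
--
--     def find(v):
--         if parent[v] != v: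
--             parent[v] = find(parent[v])
--         return parent[v]
--
--     G = [[] for _ in range(n)]
--     for c, a, b in sorted((c, a - 1, b - 1) for (a, b, c) in roads):
--         ru = find(a)
--         rv = find(b)
--         parent[ru] = rv
--         if ru != rv:
--             G[a].append((b, c))
--             G[b].append((a, c))
--
--     f = [0] * m
--     # explicit-stack post-order traversal from node 0
--     # frame: (node, parent, weight of edge to parent, next child index, subtree size so far)
--     stack = [(0, -1, 0, 0, 1)]
--     while stack:
--         v, par, c, i, sz = stack.pop()
--         row = G[v]
--         if i < len(row):
--             u, w = row[i]
--             stack.append((v, par, c, i + 1, sz))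
--             if u != par:
--                 stack.append((u, v, w, 0, 1))
--         else:
--             if stack:
--                 pv, pp, pc, pi, psz = stack.pop()
--                 stack.append((pv, pp, pc, pi, psz + sz))
--                 f[c] = sz * (n - sz)
--
--     ans = sum(x << i for i, x in enumerate(f))
--     return bin(ans)[2:]
-- ===== Notes on version B (the rewrite author's own statement) =====
-- stated objective: alternative
-- what changed: The recursive subtree-size DFS is replaced by an explicit-stack iterative post-order traversal (frames carry node, parent, edge weight, next-child index and partial subtree size), the weighted-binary value is built as a single enumerate/shift sum instead of a reversed doubling loop, the edge list is built inside sorted() instead of an append loop, and the DSU union helper is inlined into the Kruskal loop.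
import Mathlib
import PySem

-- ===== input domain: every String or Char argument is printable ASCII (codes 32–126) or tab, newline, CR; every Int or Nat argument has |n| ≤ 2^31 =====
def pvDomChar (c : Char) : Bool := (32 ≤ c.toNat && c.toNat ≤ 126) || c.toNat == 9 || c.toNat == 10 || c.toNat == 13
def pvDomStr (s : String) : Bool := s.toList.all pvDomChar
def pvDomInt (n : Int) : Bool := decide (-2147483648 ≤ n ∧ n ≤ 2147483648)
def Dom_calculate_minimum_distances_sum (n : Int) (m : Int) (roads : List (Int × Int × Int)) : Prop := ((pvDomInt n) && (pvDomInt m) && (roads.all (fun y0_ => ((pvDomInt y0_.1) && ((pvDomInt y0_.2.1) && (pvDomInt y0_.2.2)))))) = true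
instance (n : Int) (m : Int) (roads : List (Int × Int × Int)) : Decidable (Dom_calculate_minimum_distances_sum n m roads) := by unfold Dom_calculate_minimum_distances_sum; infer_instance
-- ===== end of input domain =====

-- B replaces A's recursive subtree-size DFS by an explicit-stack iterative post-order traversal,
-- builds the weighted value by an enumerate/shift sum instead of a reversed doubling loop,
-- builds the edge list inside sorted() and inlines the DSU union (objective: alternative).
-- A mutates no argument; the equivalence is about the return value.

-- ===== PORT A =====
-- G[i].append(x)  (python list index, negative from the end; in range under Pre_)
def pyAppendAt (G : List (List (Int × Int))) (i : Int) (x : Int × Int) : List (List (Int × Int)) :=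
  PySem.List.pySetD G i (PySem.List.pyGetD G i [] ++ [x])

-- dsu_get with path compression; fuel bounds the recursion depth (chain length ≤ n on real DSU states)
def dsuGetA (p : List Int) (v : Int) : Nat → List Int × Int
  | 0 => (p, v)
  | fuel+1 =>
    let pv := PySem.List.pyGetD p v v
    if pv ≠ v then
      let r := dsuGetA p pv fuel
      let p2 := PySem.List.pySetD r.1 v r.2
      (p2, PySem.List.pyGetD p2 v r.2)
    else (p, pv)

def dsuMergeA (p : List Int) (u v : Int) (fuel : Nat) : List Int × Bool :=
  let ru := dsuGetA p u fuel
  let rv := dsuGetA ru.1 v fuel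
  (PySem.List.pySetD rv.1 ru.2 rv.2, decide (ru.2 ≠ rv.2))

-- def dfs(v, par=-1): subtree sizes, f[c] = y*(n-y) per tree edge; fuel bounds the
-- recursion depth (tree depth ≤ n on the forests Kruskal produces)
def dfsA (n : Int) (G : List (List (Int × Int))) : Nat → Int → Int → List Int → List Int × Int
  | 0, _, _, f => (f, 1)
  | fuel+1, v, par, f =>
    (PySem.List.pyGetD G v []).foldl
      (fun s uc =>
        if uc.1 = par then s
        else
          let r := dfsA n G fuel uc.1 v s.1
          (PySem.List.pySetD r.1 uc.2 (r.2 * (n - r.2)), s.2 + r.2))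
      (f, 1)

def calculate_minimum_distances_sum (n : Int) (m : Int) (roads : List (Int × Int × Int)) : String :=
  let N := n.toNat
  let p0 : List Int := PySem.List.pyRange 0 n 1
  let e0 := roads.foldl (fun acc t => acc ++ [(t.2.2, t.1 - 1, t.2.1 - 1)]) ([] : List (Int × Int × Int))
  let e := PySem.List.sorted e0 (fun t => toLex (t.1, toLex (t.2.1, t.2.2))) false
  let G0 : List (List (Int × Int)) := List.replicate N []
  let pg := e.foldl (fun (s : List Int × List (List (Int × Int))) t =>
      let r := dsuMergeA s.1 t.2.1 t.2.2 (N+1)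
      if r.2 then (r.1, pyAppendAt (pyAppendAt s.2 t.2.1 (t.2.2, t.1)) t.2.2 (t.2.1, t.1))
      else (r.1, s.2)) (p0, G0)
  let f0 : List Int := List.replicate m.toNat 0
  let f := (dfsA n pg.2 ((2*roads.length+2)*(2*roads.length+3)+2) 0 (-1) f0).1
  let ans := ((PySem.List.slice? f none none (-1)).getD []).foldl (fun ans x => ans * 2 + x) 0
  PySem.Str.slice (PySem.Int.pyBin ans) (some 2) none

-- ===== PORT B =====
def dsuGetB (p : List Int) (v : Int) : Nat → List Int × Int
  | 0 => (p, v)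
  | fuel+1 =>
    let pv := PySem.List.pyGetD p v v
    if pv ≠ v then
      let r := dsuGetB p pv fuel
      let p2 := PySem.List.pySetD r.1 v r.2
      (p2, PySem.List.pyGetD p2 v r.2)
    else (p, pv)

-- G[v] of the machine
def pvRow (G : List (List (Int × Int))) (v : Int) : List (Int × Int) := PySem.List.pyGetD G v []

-- termination measure for the stack machine (cited in runB's decreasing_by only)
def pvDB (G : List (List (Int × Int))) : Nat := G.foldr (fun r acc => max r.length acc) 0

-- frame: (v, par, c, i, sz, k) — node, parent, weight of edge to parent, next child index,
-- subtree size so far, k = remaining dfs fuel (totality guard mirroring dfsA's recursion depth)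
def pvMuF (G : List (List (Int × Int))) (fr : Int × Int × Int × Nat × Int × Nat) : Nat :=
  2 * ((pvDB G + 2) ^ fr.2.2.2.2.2 * ((pvRow G fr.1).length + 1 - fr.2.2.2.1)) + 1

def pvMu (G : List (List (Int × Int))) (st : List (Int × Int × Int × Nat × Int × Nat)) : Nat :=
  (st.map (pvMuF G)).sum

-- the while-stack loop of B; the Nat fuel is a totality guard, spent one unit per
-- iteration and chosen large enough below (2*pvMu+2 ≥ the loop's step count)
def runB (n : Int) (G : List (List (Int × Int))) : Nat → List (Int × Int × Int × Nat × Int × Nat) → List Int → List Int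
  | 0, _, f => f
  | _+1, [], f => f
  | fuel+1, (v, par, c, i, sz, k) :: rest, f =>
    if h : k ≠ 0 ∧ i < (pvRow G v).length then
      if ((pvRow G v)[i]'h.2).1 = par then runB n G fuel ((v, par, c, i+1, sz, k) :: rest) f
      else runB n G fuel ((((pvRow G v)[i]'h.2).1, v, ((pvRow G v)[i]'h.2).2, 0, 1, k-1) :: (v, par, c, i+1, sz, k) :: rest) f
    else
      match rest with
      | [] => f
      | (pv, pp, pc, pi, psz, pk) :: rest' =>
        runB n G fuel ((pv, pp, pc, pi, psz + sz, pk) :: rest') (PySem.List.pySetD f c (sz * (n - sz)))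

def calculate_minimum_distances_sum_alt (n : Int) (m : Int) (roads : List (Int × Int × Int)) : String :=
  let N := n.toNat
  let parent0 : List Int := PySem.List.pyRange 0 n 1
  let e := PySem.List.sorted (roads.map (fun t => (t.2.2, t.1 - 1, t.2.1 - 1)))
      (fun t => toLex (t.1, toLex (t.2.1, t.2.2))) false
  let G0 : List (List (Int × Int)) := List.replicate N []
  let pg := e.foldl (fun (s : List Int × List (List (Int × Int))) t =>
      let ru := dsuGetB s.1 t.2.1 (N+1)
      let rv := dsuGetB ru.1 t.2.2 (N+1)
      let p3 := PySem.List.pySetD rv.1 ru.2 rv.2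
      if ru.2 ≠ rv.2 then (p3, pyAppendAt (pyAppendAt s.2 t.2.1 (t.2.2, t.1)) t.2.2 (t.2.1, t.1))
      else (p3, s.2)) (parent0, G0)
  let f0 : List Int := List.replicate m.toNat 0
  let K := (2*roads.length+2)*(2*roads.length+3)+2
  let f := runB n pg.2 (2 * pvMu pg.2 [(0, -1, 0, 0, 1, K)] + 2) [(0, -1, 0, 0, 1, K)] f0
  let ans := (PySem.List.enumerate f 0).foldl (fun a ix => a + ix.2 <<< ix.1.toNat) 0
  PySem.Str.slice (PySem.Int.pyBin ans) (some 2) none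

-- ===== PRECONDITION & SPEC =====
-- Spec-level helpers for Pre_ (finite-graph notions on the roads, not a re-run of either port):
-- the city (0-based node) behind an endpoint or a 0-based label (Python's negative indexing
-- identifies label l with l mod n), node-wise connectivity, A's e.sort() strict order, the
-- Kruskal-accepted tree edges (endpoints disconnected among the strictly sort-smaller roads),
-- and walks in the LABEL-level dfs state graph: a state (v, par) steps to (u, v) for each
-- stored neighbour label u ≠ par of v's node.
def pvNodeE (n e : Int) : Int := PySem.Int.mod (e - 1) n

def pvNodeL (n l : Int) : Int := PySem.Int.mod l n

def pvKeyLt (u t : Int × Int × Int) : Bool :=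
  u.2.2 < t.2.2 || (u.2.2 == t.2.2 && (u.1 < t.1 || (u.1 == t.1 && u.2.1 < t.2.1)))

def pvGrowN (n : Int) (roads : List (Int × Int × Int)) (s : List Int) : List Int :=
  roads.foldl (fun s t =>
    let x := pvNodeE n t.1
    let y := pvNodeE n t.2.1
    if x = y then s
    else
      let s' := if x ∈ s ∧ y ∉ s then s ++ [y] else s
      if y ∈ s' ∧ x ∉ s' then s' ++ [x] else s') s

def pvCompN (n : Int) (roads : List (Int × Int × Int)) (v : Int) : List Int :=
  (pvGrowN n roads)^[roads.length] [v]

def pvTreeRoad (n : Int) (roads : List (Int × Int × Int)) (t : Int × Int × Int) : Bool :=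
  pvNodeE n t.1 != pvNodeE n t.2.1 &&
  !(decide (pvNodeE n t.2.1 ∈ pvCompN n (roads.filter (fun u => pvKeyLt u t)) (pvNodeE n t.1)))

def pvTreeEdges (n : Int) (roads : List (Int × Int × Int)) : List (Int × Int × Int) :=
  roads.dedup.filter (pvTreeRoad n roads)

-- stored neighbour labels of node v in the adjacency lists built from the tree edges
def pvAdjL (n : Int) (T : List (Int × Int × Int)) (v : Int) : List Int :=
  T.foldr (fun t acc =>
    (if pvNodeE n t.1 == v then [t.2.1 - 1] else []) ++
    (if pvNodeE n t.2.1 == v then [t.1 - 1] else []) ++ acc) []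

def pvSuccs (n : Int) (T : List (Int × Int × Int)) (st : Int × Int) : List (Int × Int) :=
  (pvAdjL n T (pvNodeL n st.1)).filterMap (fun u => if u = st.2 then none else some (u, st.1))

-- reachable state set of the dfs from (0, -1): one growth pass, iterated past the number of
-- distinct states (so the result is the closure), and its successor-closed core: peeling the
-- states with no successor left the same number of times leaves a nonempty list exactly when a
-- cycle of states is reachable (= A's dfs recurses forever)
def pvStateBound (T : List (Int × Int × Int)) : Nat := (2*T.length+2)*(2*T.length+3)

def pvReachStates (n : Int) (roads : List (Int × Int × Int)) : List (Int × Int) :=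
  let T := pvTreeEdges n roads
  ((fun R : List (Int × Int) => (R ++ R.flatMap (pvSuccs n T)).dedup)^[pvStateBound T]) [(0, -1)]

def pvNoCycle (n : Int) (roads : List (Int × Int × Int)) : Bool :=
  let T := pvTreeEdges n roads
  (((fun U : List (Int × Int) => U.filter (fun s => (pvSuccs n T s).any (fun x => decide (x ∈ U))))^[pvStateBound T])
    (pvReachStates n roads)).isEmpty

-- some reachable dfs state crosses the tree edge t (and so writes f[weight t])
def pvReachEdge (n : Int) (roads : List (Int × Int × Int)) (t : Int × Int × Int) : Bool :=
  (pvReachStates n roads).any (fun s =>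
    (pvNodeL n s.1 == pvNodeE n t.1 && t.2.1 - 1 != s.2) ||
    (pvNodeL n s.1 == pvNodeE n t.2.1 && t.1 - 1 != s.2))

-- Pre_ excludes exactly the inputs on which A raises: n < 1 (IndexError at dfs(0)); an endpoint
-- outside [1-n, n] (IndexError in the DSU); a cycle reachable in the label-level dfs state graph
-- (A's dfs compares raw labels, so aliased labels can bounce it forever: RecursionError); and a
-- weight outside [-m, m) on a Kruskal-accepted tree edge some reachable dfs state crosses
-- (IndexError at f[c]).  Everywhere A returns, B is claimed equal.
def Pre_calculate_minimum_distances_sum (n : Int) (m : Int) (roads : List (Int × Int × Int)) : Prop :=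
  1 ≤ n ∧
  (∀ t ∈ roads, 1 - n ≤ t.1 ∧ t.1 ≤ n ∧ 1 - n ≤ t.2.1 ∧ t.2.1 ≤ n) ∧
  pvNoCycle n roads = true ∧
  (∀ t ∈ roads, pvTreeRoad n roads t = true → pvReachEdge n roads t = true →
    (-m ≤ t.2.2 ∧ t.2.2 < m))
instance (n : Int) (m : Int) (roads : List (Int × Int × Int)) : Decidable (Pre_calculate_minimum_distances_sum n m roads) := by unfold Pre_calculate_minimum_distances_sum; infer_instance

def pvWitness_calculate_minimum_distances_sum : Int × Int × (List (Int × Int × Int)) := (2, 3, [(1, 2, 1)])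

def Spec_calculate_minimum_distances_sum (n : Int) (m : Int) (roads : List (Int × Int × Int)) (out : String) : Prop := out = calculate_minimum_distances_sum_alt n m roads
instance (n : Int) (m : Int) (roads : List (Int × Int × Int)) (out : String) : Decidable (Spec_calculate_minimum_distances_sum n m roads out) := by unfold Spec_calculate_minimum_distances_sum; infer_instance

-- ===== CLAIM (what is proved, stated in full; the proofs are below) =====
def Claim_equal_calculate_minimum_distances_sum : Prop := ∀ (n : Int) (m : Int) (roads : List (Int × Int × Int)), Dom_calculate_minimum_distances_sum n m roads → Pre_calculate_minimum_distances_sum n m roads → Spec_calculate_minimum_distances_sum n m roads (calculate_minimum_distances_sum n m roads)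

-- ===== LEMMAS AND PROOFS =====

theorem dsuGetB_eq (p : List Int) (v : Int) (fuel : Nat) : dsuGetB p v fuel = dsuGetA p v fuel := by
  induction fuel generalizing p v with
  | zero => rfl
  | succ fuel ih => simp only [dsuGetB, dsuGetA, ih]

def frameSem (n : Int) (G : List (List (Int × Int))) (k : Nat) (v par : Int)
    (row : List (Int × Int)) (f : List Int) (sz : Int) : List Int × Int :=
  match k with
  | 0 => (f, sz)
  | k+1 =>
    row.foldl
      (fun s uc =>
        if uc.1 = par then s
        else
          let r := dfsA n G k uc.1 v s.1
          (PySem.List.pySetD r.1 uc.2 (r.2 * (n - r.2)), s.2 + r.2))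
      (f, sz)

theorem frameSem_dfsA (n : Int) (G : List (List (Int × Int))) (k : Nat) (v par : Int) (f : List Int) :
    frameSem n G k v par (pvRow G v) f 1 = dfsA n G k v par f := by
  cases k <;> simp [frameSem, dfsA, pvRow]

-- denotation of a machine stack
def den (n : Int) (G : List (List (Int × Int))) (stack : List (Int × Int × Int × Nat × Int × Nat)) (f : List Int) : List Int :=
  match stack with
  | [] => f
  | (v, par, c, i, sz, k) :: rest =>
    let r := frameSem n G k v par ((pvRow G v).drop i) f sz
    match rest with
    | [] => r.1
    | (pv, pp, pc, pi, psz, pk) :: rest' =>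
      den n G ((pv, pp, pc, pi, psz + r.2, pk) :: rest') (PySem.List.pySetD r.1 c (r.2 * (n - r.2)))
termination_by stack.length
decreasing_by simp

theorem frameSem_nil (n : Int) (G : List (List (Int × Int))) (k : Nat) (v par : Int) (f : List Int) (sz : Int) :
    frameSem n G k v par [] f sz = (f, sz) := by
  cases k <;> simp [frameSem]

theorem frameSem_cons (n : Int) (G : List (List (Int × Int))) (k : Nat) (v par : Int)
    (uc : Int × Int) (l : List (Int × Int)) (f : List Int) (sz : Int) (hk : k ≠ 0) :
    frameSem n G k v par (uc :: l) f sz =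
      if uc.1 = par then frameSem n G k v par l f sz
      else
        let r := dfsA n G (k-1) uc.1 v f
        frameSem n G k v par l (PySem.List.pySetD r.1 uc.2 (r.2 * (n - r.2))) (sz + r.2) := by
  obtain ⟨k0, rfl⟩ : ∃ k0, k = k0 + 1 := ⟨k - 1, by omega⟩
  by_cases hp : uc.1 = par <;> simp [frameSem, hp]

theorem frameSem_zero (n : Int) (G : List (List (Int × Int))) (v par : Int) (row : List (Int × Int)) (f : List Int) (sz : Int) :
    frameSem n G 0 v par row f sz = (f, sz) := by
  simp [frameSem]

theorem den_cons_nil (n : Int) (G : List (List (Int × Int))) (v par c : Int) (i : Nat) (sz : Int) (k : Nat) (f : List Int) :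
    den n G [(v, par, c, i, sz, k)] f = (frameSem n G k v par ((pvRow G v).drop i) f sz).1 := by
  simp [den]

theorem den_cons_cons (n : Int) (G : List (List (Int × Int))) (v par c : Int) (i : Nat) (sz : Int) (k : Nat)
    (pv pp pc : Int) (pi : Nat) (psz : Int) (pk : Nat) (rest' : List (Int × Int × Int × Nat × Int × Nat)) (f : List Int) :
    den n G ((v, par, c, i, sz, k) :: (pv, pp, pc, pi, psz, pk) :: rest') f
      = den n G ((pv, pp, pc, pi, psz + (frameSem n G k v par ((pvRow G v).drop i) f sz).2, pk) :: rest')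
          (PySem.List.pySetD (frameSem n G k v par ((pvRow G v).drop i) f sz).1 c
            ((frameSem n G k v par ((pvRow G v).drop i) f sz).2 * (n - (frameSem n G k v par ((pvRow G v).drop i) f sz).2))) := by
  simp [den]

theorem pvDB_ge (r : List (Int × Int)) : ∀ (G : List (List (Int × Int))), r ∈ G → r.length ≤ pvDB G
  | x :: xs, hm => by
    rcases List.mem_cons.mp hm with h1 | h1
    · simp only [pvDB, List.foldr_cons]; rw [h1]; exact le_max_left _ _
    · simp only [pvDB, List.foldr_cons]
      exact le_trans (pvDB_ge r xs h1) (le_max_right _ _)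

theorem pvRow_len_le (G : List (List (Int × Int))) (v : Int) : (pvRow G v).length ≤ pvDB G := by
  unfold pvRow
  rcases h : PySem.List.pyGet? G v with _ | r
  · simp [PySem.List.pyGetD, h]
  · have hm : r ∈ G := PySem.List.mem_of_pyGet?_eq_some G h
    simpa [PySem.List.pyGetD, h] using pvDB_ge r G hm

theorem pvChildLt (D k Lu A B : Nat) (hk : k ≠ 0) (hLu : Lu ≤ D) :
    (2 * ((D+2) ^ (k-1) * (Lu + 1)) + 1) + (2 * ((D+2) ^ k * A) + 1) + B
      < (2 * ((D+2) ^ k * (A + 1)) + 1) + B := by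
  have hP : 1 ≤ (D+2) ^ (k-1) := Nat.one_le_pow _ _ (by omega)
  have hpow : (D+2) ^ k = (D+2) ^ (k-1) * (D+2) := by
    conv_lhs => rw [show k = (k-1) + 1 by omega]
    rw [pow_succ]
  nlinarith [hP, hpow]

theorem mu_skip (G : List (List (Int × Int))) (v par c : Int) (i : Nat) (sz : Int) (k : Nat)
    (rest : List (Int × Int × Int × Nat × Int × Nat)) (hc : k ≠ 0 ∧ i < (pvRow G v).length) :
    pvMu G ((v, par, c, i+1, sz, k) :: rest) < pvMu G ((v, par, c, i, sz, k) :: rest) := by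
  simp only [pvMu, List.map_cons, List.sum_cons, pvMuF]
  have hP : 0 < (pvDB G + 2) ^ k := Nat.pow_pos (by omega)
  have hL : (pvRow G v).length + 1 - (i+1) < (pvRow G v).length + 1 - i := by omega
  have := Nat.mul_lt_mul_of_pos_left hL hP
  omega

theorem mu_child (G : List (List (Int × Int))) (u v par c w : Int) (i : Nat) (sz szc : Int) (k : Nat)
    (rest : List (Int × Int × Int × Nat × Int × Nat)) (hc : k ≠ 0 ∧ i < (pvRow G v).length) :
    pvMu G ((u, v, w, 0, szc, k-1) :: (v, par, c, i+1, sz, k) :: rest) < pvMu G ((v, par, c, i, sz, k) :: rest) := by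
  simp only [pvMu, List.map_cons, List.sum_cons, pvMuF, Nat.sub_zero]
  have hLu : (pvRow G u).length ≤ pvDB G := pvRow_len_le G u
  have h1 : (pvRow G v).length + 1 - i = ((pvRow G v).length + 1 - (i+1)) + 1 := by omega
  rw [h1]
  have := pvChildLt (pvDB G) k (pvRow G u).length ((pvRow G v).length + 1 - (i+1))
    ((rest.map (pvMuF G)).sum) hc.1 hLu
  omega

theorem mu_comp (G : List (List (Int × Int))) (v par c pv pp pc : Int) (i pi : Nat) (sz psz psz2 : Int) (k pk : Nat)
    (rest' : List (Int × Int × Int × Nat × Int × Nat)) :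
    pvMu G ((pv, pp, pc, pi, psz2, pk) :: rest') ≤ pvMu G ((v, par, c, i, sz, k) :: (pv, pp, pc, pi, psz, pk) :: rest') := by
  simp only [pvMu, List.map_cons, List.sum_cons, pvMuF]
  omega

theorem runB_eq_den (n : Int) (G : List (List (Int × Int))) : ∀ (fuel : Nat) (stack : List (Int × Int × Int × Nat × Int × Nat)) (f : List Int),
    2 * pvMu G stack + stack.length < fuel → runB n G fuel stack f = den n G stack f := by
  intro fuel
  induction fuel with
  | zero => intro stack f h; exact absurd h (by omega)
  | succ fuel ih =>
    intro stack f h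
    rcases stack with _ | ⟨⟨v, par, c, i, sz, k⟩, rest⟩
    · simp [runB, den]
    · simp only [runB]
      by_cases hc : k ≠ 0 ∧ i < (pvRow G v).length
      · rw [dif_pos hc]
        by_cases hp : ((pvRow G v)[i]'hc.2).1 = par
        · rw [if_pos hp]
          rw [ih _ f (by
            have := mu_skip G v par c i sz k rest hc
            simp only [List.length_cons] at h ⊢
            omega)]
          cases rest with
          | nil =>
            rw [den_cons_nil, den_cons_nil, List.drop_eq_getElem_cons hc.2,
              frameSem_cons _ _ _ _ _ _ _ _ _ hc.1]
            simp [hp]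
          | cons p rest' =>
            obtain ⟨pv, pp, pc, pi, psz, pk⟩ := p
            rw [den_cons_cons, den_cons_cons, List.drop_eq_getElem_cons hc.2,
              frameSem_cons _ _ _ _ _ _ _ _ _ hc.1]
            simp [hp]
        · rw [if_neg hp]
          rw [ih _ f (by
            have := mu_child G ((pvRow G v)[i]'hc.2).1 v par c ((pvRow G v)[i]'hc.2).2 i sz 1 k rest hc
            simp only [List.length_cons] at h ⊢
            omega)]
          cases rest with
          | nil =>
            rw [den_cons_cons, den_cons_nil, den_cons_nil, List.drop_zero, frameSem_dfsA,
              List.drop_eq_getElem_cons hc.2, frameSem_cons _ _ _ _ _ _ _ _ _ hc.1]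
            simp [if_neg hp]
          | cons p rest' =>
            obtain ⟨pv, pp, pc, pi, psz, pk⟩ := p
            rw [den_cons_cons, den_cons_cons, den_cons_cons, List.drop_zero, frameSem_dfsA,
              List.drop_eq_getElem_cons hc.2, frameSem_cons _ _ _ _ _ _ _ _ _ hc.1]
            simp [if_neg hp]
      · rw [dif_neg hc]
        rcases rest with _ | ⟨⟨pv, pp, pc, pi, psz, pk⟩, rest'⟩
        · dsimp only
          rw [den_cons_nil]
          rcases Decidable.not_and_iff_not_or_not.mp hc with h0 | h0
          · have hk : k = 0 := by omega
            subst hk; rw [frameSem_zero]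
          · have hd : (pvRow G v).drop i = [] := List.drop_eq_nil_of_le (by omega)
            rw [hd, frameSem_nil]
        · dsimp only
          rw [ih _ _ (by
            have := mu_comp G v par c pv pp pc i pi sz psz (psz + sz) k pk rest'
            simp only [List.length_cons] at h ⊢
            omega)]
          rw [den_cons_cons]
          rcases Decidable.not_and_iff_not_or_not.mp hc with h0 | h0
          · have hk : k = 0 := by omega
            subst hk; rw [frameSem_zero]
          · have hd : (pvRow G v).drop i = [] := List.drop_eq_nil_of_le (by omega)
            rw [hd, frameSem_nil]

theorem runB_start (n : Int) (G : List (List (Int × Int))) (fr0 : Int × Int × Int × Nat × Int × Nat) (f0 : List Int) :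
    runB n G (2 * pvMu G [fr0] + 2) [fr0] f0 = den n G [fr0] f0 := by
  apply runB_eq_den
  simp only [List.length_cons, List.length_nil]
  omega

-- value of f as a weighted binary number, starting at bit s
def pvT : List Int → Nat → Int
  | [], _ => 0
  | x :: t, s => x * 2 ^ s + pvT t (s + 1)

theorem pvT_succ (f : List Int) : ∀ s, pvT f (s + 1) = 2 * pvT f s := by
  induction f with
  | nil => intro s; simp [pvT]
  | cons x t ih => intro s; simp only [pvT, ih (s+1)]; ring

theorem rev_fold_eq (f : List Int) : ∀ a : Int,
    f.reverse.foldl (fun ans x => ans * 2 + x) a = a * 2 ^ f.length + pvT f 0 := by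
  induction f with
  | nil => intro a; simp [pvT]
  | cons x t ih =>
    intro a
    rw [List.reverse_cons, List.foldl_append, ih a]
    simp only [List.foldl_cons, List.foldl_nil, pvT, List.length_cons]
    rw [pvT_succ t 0]
    ring

theorem enum_fold_eq (f : List Int) : ∀ (s : Nat) (a : Int),
    (PySem.List.enumerate f (s : Int)).foldl (fun a ix => a + ix.2 <<< ix.1.toNat) a = a + pvT f s := by
  induction f with
  | nil => intro s a; simp [PySem.List.enumerate_nil, pvT]
  | cons x t ih =>
    intro s a
    rw [PySem.List.enumerate_cons]
    have hc : (s : Int) + 1 = ((s + 1 : Nat) : Int) := by push_cast; ring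
    simp only [List.foldl_cons, hc, ih (s+1)]
    simp only [pvT, Int.toNat_natCast, Int.shiftLeft_eq]
    ring

theorem ans_eq (f : List Int) :
    ((PySem.List.slice? f none none (-1)).getD []).foldl (fun ans x => ans * 2 + x) 0
      = (PySem.List.enumerate f 0).foldl (fun a ix => a + ix.2 <<< ix.1.toNat) 0 := by
  rw [PySem.List.slice?_none_none_neg_one]
  conv_rhs => rw [show (PySem.List.enumerate f 0) = (PySem.List.enumerate f ((0:Nat):Int)) from rfl]
  rw [Option.getD_some, rev_fold_eq f 0, enum_fold_eq f 0 0]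
  ring

theorem step_eq (N : Nat) :
    (fun (s : List Int × List (List (Int × Int))) (t : Int × Int × Int) =>
      let r := dsuMergeA s.1 t.2.1 t.2.2 (N+1)
      if r.2 then (r.1, pyAppendAt (pyAppendAt s.2 t.2.1 (t.2.2, t.1)) t.2.2 (t.2.1, t.1))
      else (r.1, s.2))
    = (fun (s : List Int × List (List (Int × Int))) (t : Int × Int × Int) =>
      let ru := dsuGetB s.1 t.2.1 (N+1)
      let rv := dsuGetB ru.1 t.2.2 (N+1)
      let p3 := PySem.List.pySetD rv.1 ru.2 rv.2
      if ru.2 ≠ rv.2 then (p3, pyAppendAt (pyAppendAt s.2 t.2.1 (t.2.2, t.1)) t.2.2 (t.2.1, t.1))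
      else (p3, s.2)) := by
  funext s t
  simp only [dsuMergeA, dsuGetB_eq]
  by_cases h : (dsuGetA s.1 t.2.1 (N+1)).2 ≠ (dsuGetA (dsuGetA s.1 t.2.1 (N+1)).1 t.2.2 (N+1)).2 <;>
    simp [h]

-- ===== VERDICT (by name: the statement is the Claim_ definition above) =====
theorem calculate_minimum_distances_sum_spec : Claim_equal_calculate_minimum_distances_sum := by
  unfold Claim_equal_calculate_minimum_distances_sum
  intro n m roads _ _
  unfold Spec_calculate_minimum_distances_sum
  unfold calculate_minimum_distances_sum calculate_minimum_distances_sum_alt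
  simp only [PySem.List.foldl_append_singleton_eq_map, List.nil_append, step_eq,
    runB_start, den_cons_nil, List.drop_zero, frameSem_dfsA, ans_eq]
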